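-- pv_equiv track=rewrite | github.com/Anzdanial/PROGRAMMING | Programs Python/OR_QUIZ/main.py | calculate_minimum_cost
-- ===== SOURCE A (Python) =====
-- def calculate_minimum_cost(sequence):
--     total_cost = 0
--
--     while len(sequence) > 1:
--         min_index = sequence.index(min(sequence))
--         if min_index == 0:
--             total_cost += sequence[0] + sequence[1]
--             sequence = sequence[2:]
--         elif min_index == len(sequence) - 1:
--             total_cost += sequence[-1] + sequence[-2]
--             sequence = sequence[:-2]
--         else:
--             if sequence[min_index - 1] < sequence[min_index + 1]:
--                 total_cost += sequence[min_index] + sequence[min_index - 1]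
--                 sequence = sequence[:min_index - 1] + sequence[min_index + 1:]
--             else:
--                 total_cost += sequence[min_index] + sequence[min_index + 1]
--                 sequence = sequence[:min_index] + sequence[min_index + 2:]
--
--     return total_cost
-- ===== SOURCE B (Python) =====
-- def calculate_minimum_cost(sequence):
--     # Every removal step adds exactly the removed pair's values to the cost,
--     # so the total cost is the sum of everything except the single survivor
--     # (odd length) or the full sum (even length).
--     total = sum(sequence)
--     if len(sequence) % 2 == 1:
--         total -= _survivor(sequence)
--     return total
--
--
-- def _survivor(seq):
--     # Repeatedly delete the (first) minimum together with its smaller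
--     # neighbour, until one element survives.
--     while len(seq) > 1:
--         m = 0
--         best = seq[0]
--         for i, x in enumerate(seq):
--             if x < best:
--                 m = i
--                 best = x
--         if m == 0:
--             lo = 0
--         elif m == len(seq) - 1:
--             lo = m - 1
--         elif seq[m - 1] < seq[m + 1]:
--             lo = m - 1
--         else:
--             lo = m
--         seq = [x for i, x in enumerate(seq) if i != lo and i != lo + 1]
--     return seq[0]
-- ===== Notes on version B (the rewrite author's own statement) =====
-- stated objective: alternative
-- what changed: B replaces A's per-step cost accumulation by the identity 'cost = sum of the list minus the single survivor': even-length inputs are answered by one summation pass with no loop at all, and for odd-length inputs B only searches for the surviving element (single-pass argmin plus index-filter removal) instead of min()+index()+slice bookkeeping with a running total.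
import Mathlib
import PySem

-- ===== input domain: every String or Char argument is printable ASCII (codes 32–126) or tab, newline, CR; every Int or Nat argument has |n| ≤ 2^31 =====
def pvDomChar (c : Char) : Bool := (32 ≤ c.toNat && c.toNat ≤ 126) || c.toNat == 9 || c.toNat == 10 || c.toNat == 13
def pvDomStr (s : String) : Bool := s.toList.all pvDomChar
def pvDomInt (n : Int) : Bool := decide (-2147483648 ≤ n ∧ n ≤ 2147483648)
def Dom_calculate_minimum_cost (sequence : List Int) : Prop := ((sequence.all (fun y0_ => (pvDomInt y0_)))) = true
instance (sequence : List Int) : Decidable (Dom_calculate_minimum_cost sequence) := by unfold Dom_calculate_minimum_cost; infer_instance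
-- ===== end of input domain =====

-- B replaces A's cost accumulation by the identity "cost = sum of the list minus the
-- single survivor (odd length) / the full sum (even length)": even-length inputs take
-- one pass, odd-length inputs only search for the survivor. (objective: alternative)

-- ===== PORT A =====
-- fuel = sequence.length is a totality guard only: each loop iteration removes 2 elements
def aLoop : Nat → List Int → Int → Int
  | 0, _, total => total
  | fuel+1, seq, total =>
    if 1 < seq.length then
      match PySem.List.min? seq (fun x => x) with
      | none => total        -- unreachable: seq is nonempty under the guard
      | some mv =>
        match PySem.List.index? seq mv with
        | none => total      -- unreachable: mv ∈ seq
        | some mIdx =>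
          if mIdx = 0 then
            aLoop fuel (PySem.List.slice seq (some 2) none)
              (total + (PySem.List.pyGetD seq 0 0 + PySem.List.pyGetD seq 1 0))
          else if mIdx = seq.length - 1 then
            aLoop fuel (PySem.List.slice seq none (some (-2)))
              (total + (PySem.List.pyGetD seq (-1) 0 + PySem.List.pyGetD seq (-2) 0))
          else
            if PySem.List.pyGetD seq ((mIdx : Int) - 1) 0 < PySem.List.pyGetD seq ((mIdx : Int) + 1) 0 then
              aLoop fuel
                (PySem.List.slice seq none (some ((mIdx : Int) - 1)) ++ PySem.List.slice seq (some ((mIdx : Int) + 1)) none)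
                (total + (PySem.List.pyGetD seq (mIdx : Int) 0 + PySem.List.pyGetD seq ((mIdx : Int) - 1) 0))
            else
              aLoop fuel
                (PySem.List.slice seq none (some (mIdx : Int)) ++ PySem.List.slice seq (some ((mIdx : Int) + 2)) none)
                (total + (PySem.List.pyGetD seq (mIdx : Int) 0 + PySem.List.pyGetD seq ((mIdx : Int) + 1) 0))
    else total

def calculate_minimum_cost (sequence : List Int) : Int :=
  aLoop sequence.length sequence 0

-- ===== PORT B =====
-- _survivor's while loop; fuel = length is a totality guard only
def bLoop : Nat → List Int → Int
  | 0, seq => PySem.List.pyGetD seq 0 0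
  | fuel+1, seq =>
    if 1 < seq.length then
      let st := (PySem.List.enumerate seq 0).foldl
        (fun s p => if p.2 < s.2 then p else s) (0, PySem.List.pyGetD seq 0 0)
      let m := st.1
      let lo : Int :=
        if m = 0 then 0
        else if m = (seq.length : Int) - 1 then m - 1
        else if PySem.List.pyGetD seq (m - 1) 0 < PySem.List.pyGetD seq (m + 1) 0 then m - 1
        else m
      bLoop fuel (((PySem.List.enumerate seq 0).filter
        (fun p => !(p.1 == lo) && !(p.1 == lo + 1))).map (·.2))
    else PySem.List.pyGetD seq 0 0

def calculate_minimum_cost_alt (sequence : List Int) : Int :=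
  let total := sequence.sum
  if sequence.length % 2 = 1 then total - bLoop sequence.length sequence else total

-- ===== PRECONDITION & SPEC =====
def Spec_calculate_minimum_cost (sequence : List Int) (out : Int) : Prop := out = calculate_minimum_cost_alt sequence
instance (sequence : List Int) (out : Int) : Decidable (Spec_calculate_minimum_cost sequence out) := by unfold Spec_calculate_minimum_cost; infer_instance

-- ===== CLAIM (what is proved, stated in full; the proofs are below) =====
def Claim_equal_calculate_minimum_cost : Prop := ∀ (sequence : List Int), Dom_calculate_minimum_cost sequence → Spec_calculate_minimum_cost sequence (calculate_minimum_cost sequence)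

-- ===== LEMMAS AND PROOFS =====

-- m is the first position of the minimum of l
def Pmin (l : List Int) (m : Nat) : Prop :=
  m < l.length ∧ (∀ y ∈ l, l.getD m 0 ≤ y) ∧ ∀ j, j < m → l.getD m 0 < l.getD j 0

lemma getD_mem_of_lt {l : List Int} {m : Nat} (h : m < l.length) : l.getD m 0 ∈ l := by
  rw [List.getD_eq_getElem _ _ h]; exact List.getElem_mem _

lemma Pmin_unique {l : List Int} {m1 m2 : Nat} (h1 : Pmin l m1) (h2 : Pmin l m2) : m1 = m2 := by
  obtain ⟨hl1, hmin1, hfst1⟩ := h1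
  obtain ⟨hl2, hmin2, hfst2⟩ := h2
  rcases Nat.lt_trichotomy m1 m2 with h | h | h
  · exact absurd (hmin1 _ (getD_mem_of_lt hl2)) (not_le.mpr (hfst2 _ h))
  · exact h
  · exact absurd (hmin2 _ (getD_mem_of_lt hl1)) (not_le.mpr (hfst1 _ h))

lemma a_min_index {seq : List Int} {mv : Int} {k : Nat}
    (hmv : PySem.List.min? seq (fun x => x) = some mv)
    (hk : PySem.List.index? seq mv = some k) :
    Pmin seq k ∧ seq.getD k 0 = mv := by
  obtain ⟨hklt, hkv, hfst⟩ := PySem.List.getElem_of_index?_eq_some hk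
  have hgd : seq.getD k 0 = mv := by rw [List.getD_eq_getElem _ _ hklt]; exact hkv
  have hmin := PySem.List.min?_isMin hmv
  refine ⟨⟨hklt, ?_, ?_⟩, hgd⟩
  · intro y hy; rw [hgd]; exact hmin y hy
  · intro j hj
    have hjlt : j < seq.length := lt_trans hj hklt
    rw [hgd, List.getD_eq_getElem _ _ hjlt]
    exact lt_of_le_of_ne (hmin _ (List.getElem_mem _)) (fun e => hfst j hj e.symm)

lemma fold_inv (l : List Int) (k bi bv : Int) :
    ((PySem.List.enumerate l k).foldl (fun s p => if p.2 < s.2 then p else s) (bi, bv) = (bi, bv)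
      ∧ ∀ y ∈ l, bv ≤ y)
    ∨ ∃ j : Nat, j < l.length
        ∧ (PySem.List.enumerate l k).foldl (fun s p => if p.2 < s.2 then p else s) (bi, bv)
            = (k + (j : Int), l.getD j 0)
        ∧ l.getD j 0 < bv ∧ (∀ y ∈ l, l.getD j 0 ≤ y) ∧ ∀ i, i < j → l.getD j 0 < l.getD i 0 := by
  induction l generalizing k bi bv with
  | nil => left; simp [PySem.List.enumerate_nil]
  | cons x xs ih =>
    rw [PySem.List.enumerate_cons, List.foldl_cons]
    by_cases hx : x < bv
    · simp only [hx, if_pos]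
      rcases ih (k+1) k x with ⟨heq, hall⟩ | ⟨j, hj, heq, hlt, hall, hfst⟩
      · right
        refine ⟨0, by simp, by simpa using heq, by simpa using hx, ?_, by intro i hi; omega⟩
        intro y hy
        rcases List.mem_cons.mp hy with rfl | hy
        · simp
        · simpa using hall y hy
      · right
        refine ⟨j+1, by simpa using hj, ?_, ?_, ?_, ?_⟩
        · rw [heq]; congr 1; push_cast; ring
        · simp only [List.getD_cons_succ]; exact lt_trans hlt hx
        · intro y hy
          simp only [List.getD_cons_succ]
          rcases List.mem_cons.mp hy with rfl | hy
          · exact le_of_lt hlt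
          · exact hall y hy
        · intro i hi
          cases i with
          | zero => simpa using hlt
          | succ i' => simp only [List.getD_cons_succ]; exact hfst i' (by omega)
    · simp only [hx, if_false]
      rw [not_lt] at hx
      rcases ih (k+1) bi bv with ⟨heq, hall⟩ | ⟨j, hj, heq, hlt, hall, hfst⟩
      · left
        refine ⟨heq, ?_⟩
        intro y hy; rcases List.mem_cons.mp hy with rfl | hy
        · exact hx
        · exact hall y hy
      · right
        refine ⟨j+1, by simpa using hj, ?_, ?_, ?_, ?_⟩
        · rw [heq]; congr 1; push_cast; ring
        · simp only [List.getD_cons_succ]; exact hlt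
        · intro y hy
          simp only [List.getD_cons_succ]
          rcases List.mem_cons.mp hy with rfl | hy
          · exact le_of_lt (lt_of_lt_of_le hlt hx)
          · exact hall y hy
        · intro i hi
          cases i with
          | zero => simpa using lt_of_lt_of_le hlt hx
          | succ i' => simp only [List.getD_cons_succ]; exact hfst i' (by omega)

lemma b_fold (seq : List Int) (h : seq ≠ []) :
    ∃ m : Nat, Pmin seq m ∧
      (PySem.List.enumerate seq 0).foldl (fun s p => if p.2 < s.2 then p else s)
        (0, PySem.List.pyGetD seq 0 0) = ((m : Int), seq.getD m 0) := by
  have h0 : 0 < seq.length := List.length_pos_iff.mpr h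
  rw [PySem.List.pyGetD_zero]
  rcases fold_inv seq 0 0 (seq.getD 0 0) with ⟨heq, hall⟩ | ⟨j, hj, heq, hlt, hall, hfst⟩
  · exact ⟨0, ⟨h0, hall, by intro i hi; omega⟩, by simpa using heq⟩
  · exact ⟨j, ⟨hj, hall, hfst⟩, by simpa using heq⟩

lemma enum_fst_ge {α : Type} (l : List α) (s : Int) : ∀ p ∈ PySem.List.enumerate l s, s ≤ p.1 := by
  intro p hp
  have h1 : p.1 ∈ (PySem.List.enumerate l s).map (·.1) := List.mem_map_of_mem hp
  rw [PySem.List.map_fst_enumerate] at h1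
  exact ((PySem.List.mem_pyRange_one).mp h1).1

lemma rem1 {α : Type} (l : List α) (s : Int) :
    ((PySem.List.enumerate l s).filter (fun p => !(p.1 == s))).map (·.2) = l.drop 1 := by
  cases l with
  | nil => simp [PySem.List.enumerate_nil]
  | cons x xs =>
    rw [PySem.List.enumerate_cons, List.filter_cons]
    simp only [beq_self_eq_true, Bool.not_true]
    rw [List.filter_congr (q := fun _ => true) ?_, List.filter_true]
    · simp [PySem.List.map_snd_enumerate]
    · intro p hp
      have hge := enum_fst_ge xs (s+1) p hp
      have hne : p.1 ≠ s := by omega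
      simp [hne]

lemma rem2 (l : List Int) (s : Int) (lo : Nat) (h : lo + 1 < l.length) :
    ((PySem.List.enumerate l s).filter
        (fun p => !(p.1 == s + (lo : Int)) && !(p.1 == s + (lo : Int) + 1))).map (·.2)
      = l.take lo ++ l.drop (lo + 2) := by
  induction l generalizing s lo with
  | nil => simp at h
  | cons x xs ih =>
    rw [PySem.List.enumerate_cons, List.filter_cons]
    cases lo with
    | zero =>
      simp only [Nat.cast_zero, add_zero]
      have hhead : (!(s == s) && !(s == s + 1)) = false := by simp
      rw [hhead]
      simp only [Bool.false_eq_true, if_false]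
      rw [List.filter_congr (q := fun p => !(p.1 == s + 1)) ?_]
      · simpa using rem1 xs (s+1)
      · intro p hp
        have hge := enum_fst_ge xs (s+1) p hp
        have hne : p.1 ≠ s := by omega
        simp [hne]
    | succ lo' =>
      have h1 : (s == s + ((lo' : Int) + 1)) = false := by
        simp only [beq_eq_false_iff_ne]; omega
      have h2 : (s == s + ((lo' : Int) + 1) + 1) = false := by
        simp only [beq_eq_false_iff_ne]; omega
      simp only [Nat.cast_succ, h1, h2, Bool.not_false, Bool.and_self, if_true]
      rw [List.filter_congr
          (q := fun p => !(p.1 == (s+1) + (lo' : Int)) && !(p.1 == (s+1) + (lo' : Int) + 1)) ?_]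
      · rw [List.map_cons, ih (s+1) lo' (by simpa using Nat.lt_of_succ_lt_succ h)]
        simp [List.take_succ_cons, List.drop_succ_cons]
      · intro p hp
        have harg : s + ((lo' : Int) + 1) = (s+1) + (lo' : Int) := by ring
        simp [harg]

lemma sum_remove2 (l : List Int) (lo : Nat) (h : lo + 1 < l.length) :
    (l.take lo ++ l.drop (lo + 2)).sum = l.sum - l.getD lo 0 - l.getD (lo + 1) 0 := by
  have h0 : lo < l.length := by omega
  have hd1 : l.drop lo = l[lo] :: l.drop (lo + 1) := List.drop_eq_getElem_cons h0
  have hd2 : l.drop (lo + 1) = l[lo + 1] :: l.drop (lo + 2) := List.drop_eq_getElem_cons h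
  have hs : l.sum = (l.take lo).sum + (l[lo] + (l[lo + 1] + (l.drop (lo + 2)).sum)) := by
    have : l.sum = (l.take lo).sum + (l.drop lo).sum := by
      rw [← List.sum_append, List.take_append_drop]
    rw [this, hd1, hd2, List.sum_cons, List.sum_cons]
  rw [List.getD_eq_getElem _ _ h0, List.getD_eq_getElem _ _ h, List.sum_append, hs]
  ring

lemma length_remove2 (l : List Int) (lo : Nat) (h : lo + 1 < l.length) :
    (l.take lo ++ l.drop (lo + 2)).length = l.length - 2 := by
  simp [List.length_take, List.length_drop]; omega

lemma rem2' (l : List Int) (lo : Nat) (h : lo + 1 < l.length) :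
    ((PySem.List.enumerate l 0).filter
        (fun p => !(p.1 == (lo : Int)) && !(p.1 == (lo : Int) + 1))).map (·.2)
      = l.take lo ++ l.drop (lo + 2) := by
  have h2 := rem2 l 0 lo h
  simpa using h2

lemma step_spec (seq : List Int) (h : 1 < seq.length) :
    ∃ lo : Nat, lo + 1 < seq.length ∧
      (∀ fuel total, aLoop (fuel+1) seq total
          = aLoop fuel (seq.take lo ++ seq.drop (lo + 2)) (total + (seq.getD lo 0 + seq.getD (lo+1) 0))) ∧
      (∀ fuel, bLoop (fuel+1) seq = bLoop fuel (seq.take lo ++ seq.drop (lo + 2))) := by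
  have hne : seq ≠ [] := by intro e; rw [e] at h; simp at h
  obtain ⟨mv, hmv⟩ : ∃ mv, PySem.List.min? seq (fun x => x) = some mv := by
    cases hmv : PySem.List.min? seq (fun x => x) with
    | none => exact absurd ((PySem.List.min?_eq_none_iff seq _).mp hmv) hne
    | some mv => exact ⟨mv, rfl⟩
  obtain ⟨k, hk⟩ : ∃ k, PySem.List.index? seq mv = some k :=
    Option.isSome_iff_exists.mp ((PySem.List.index?_isSome_iff seq mv).mpr (PySem.List.min?_mem hmv))
  obtain ⟨hPA, hgd⟩ := a_min_index hmv hk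
  obtain ⟨m, hPB, hfold⟩ := b_fold seq hne
  have hmk : m = k := Pmin_unique hPB hPA
  subst hmk
  have hklen : m < seq.length := hPA.1
  by_cases hk0 : m = 0
  · subst hk0
    refine ⟨0, by omega, ?_, ?_⟩
    · intro fuel total
      simp only [aLoop, if_pos h, hmv, hk]
      have h1 : PySem.List.pyGetD seq 1 0 = seq.getD 1 0 := by
        have e : (1:Int) = ((1:Nat):Int) := by norm_num
        rw [e, PySem.List.pyGetD_natCast]
      rw [PySem.List.slice_from seq (by norm_num), PySem.List.pyGetD_zero, h1]
      have e2 : (2:Int).toNat = 2 := rfl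
      rw [e2]
      norm_num
    · intro fuel
      simp only [bLoop, if_pos h, hfold]
      congr 1
      have hr := rem2' seq 0 (by omega)
      simpa using hr
  · by_cases hklast : m = seq.length - 1
    · -- min at the right end
      refine ⟨m - 1, by omega, ?_, ?_⟩
      · intro fuel total
        simp only [aLoop, if_pos h, hmv, hk, if_neg hk0, if_pos hklast]
        congr 1
        · rw [PySem.List.slice_to_neg_ofNat seq 2 (by norm_num)]
          have hd : seq.drop (m - 1 + 2) = [] := by
            apply List.drop_eq_nil_of_le; omega
          rw [hd, List.append_nil]
          congr 1; omega
        · have hg1 : PySem.List.pyGetD seq (-1) 0 = seq.getD (seq.length - 1) 0 := by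
            rw [PySem.List.pyGetD_neg_ofNat seq 1 0 (by norm_num) (by omega)]
            exact (List.getD_eq_getElem _ _ (by omega)).symm
          have hg2 : PySem.List.pyGetD seq (-2) 0 = seq.getD (seq.length - 2) 0 := by
            rw [PySem.List.pyGetD_neg_ofNat seq 2 0 (by norm_num) (by omega)]
            exact (List.getD_eq_getElem _ _ (by omega)).symm
          rw [hg1, hg2]
          have e1 : m - 1 = seq.length - 2 := by omega
          have e2 : m - 1 + 1 = seq.length - 1 := by omega
          rw [e2, e1]; ring
      · intro fuel
        simp only [bLoop, if_pos h, hfold]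
        have hc0 : ¬ ((m : Int) = 0) := by omega
        have hcl : ((m : Int) = (seq.length : Int) - 1) := by omega
        rw [if_neg hc0, if_pos hcl]
        congr 1
        have hcast : (m : Int) - 1 = ((m - 1 : Nat) : Int) := by omega
        rw [hcast]
        exact rem2' seq (m - 1) (by omega)
    · -- min strictly inside
      have hk1 : 1 ≤ m := by omega
      have hkl : m + 1 < seq.length := by omega
      have hc1 : (m : Int) - 1 = ((m - 1 : Nat) : Int) := by omega
      have hc2 : (m : Int) + 1 = ((m + 1 : Nat) : Int) := by push_cast; ring
      have hc3 : (m : Int) + 2 = ((m + 2 : Nat) : Int) := by push_cast; ring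
      have hg1 : PySem.List.pyGetD seq ((m : Int) - 1) 0 = seq.getD (m - 1) 0 := by
        rw [hc1, PySem.List.pyGetD_natCast]
      have hg2 : PySem.List.pyGetD seq ((m : Int) + 1) 0 = seq.getD (m + 1) 0 := by
        rw [hc2, PySem.List.pyGetD_natCast]
      have hg0 : PySem.List.pyGetD seq (m : Int) 0 = seq.getD m 0 := PySem.List.pyGetD_natCast seq m 0
      by_cases hcmp : seq.getD (m - 1) 0 < seq.getD (m + 1) 0
      · refine ⟨m - 1, by omega, ?_, ?_⟩
        · intro fuel total
          simp only [aLoop, if_pos h, hmv, hk, if_neg hk0, if_neg hklast]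
          rw [if_pos (by rw [hg1, hg2]; exact hcmp)]
          congr 1
          · rw [hc1, hc2, PySem.List.slice_to_natCast, PySem.List.slice_from_natCast]
            have e : m - 1 + 2 = m + 1 := by omega
            rw [e]
          · rw [hg0, hg1]
            have e2 : m - 1 + 1 = m := by omega
            rw [e2]; ring
        · intro fuel
          simp only [bLoop, if_pos h, hfold]
          have hb0 : ¬ ((m : Int) = 0) := by omega
          have hbl : ¬ ((m : Int) = (seq.length : Int) - 1) := by omega
          rw [if_neg hb0, if_neg hbl, if_pos (by rw [hg1, hg2]; exact hcmp)]
          congr 1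
          rw [hc1]
          exact rem2' seq (m - 1) (by omega)
      · refine ⟨m, by omega, ?_, ?_⟩
        · intro fuel total
          simp only [aLoop, if_pos h, hmv, hk, if_neg hk0, if_neg hklast]
          rw [if_neg (by rw [hg1, hg2]; exact hcmp)]
          congr 1
          · rw [hc3, PySem.List.slice_to_natCast, PySem.List.slice_from_natCast]
          · rw [hg0, hg2]
        · intro fuel
          simp only [bLoop, if_pos h, hfold]
          have hb0 : ¬ ((m : Int) = 0) := by omega
          have hbl : ¬ ((m : Int) = (seq.length : Int) - 1) := by omega
          rw [if_neg hb0, if_neg hbl, if_neg (by rw [hg1, hg2]; exact hcmp)]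
          congr 1
          exact rem2' seq m (by omega)

lemma main_loop : ∀ (fuel : Nat) (seq : List Int) (total : Int), seq.length ≤ fuel →
    aLoop fuel seq total
      = if seq.length % 2 = 1 then total + seq.sum - bLoop fuel seq else total + seq.sum := by
  intro fuel
  induction fuel with
  | zero =>
    intro seq total hle
    have hnil : seq = [] := List.eq_nil_of_length_eq_zero (by omega)
    subst hnil
    simp [aLoop]
  | succ fuel ih =>
    intro seq total hle
    by_cases h : 1 < seq.length
    · obtain ⟨lo, hlo, hA, hB⟩ := step_spec seq h
      have hlen := length_remove2 seq lo hlo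
      have hsum := sum_remove2 seq lo hlo
      rw [hA fuel total, hB fuel, ih _ _ (by rw [hlen]; omega), hlen, hsum]
      have hpar : (seq.length - 2) % 2 = seq.length % 2 := by omega
      rw [hpar]
      split <;> ring
    · cases seq with
      | nil => simp [aLoop]
      | cons x xs =>
        have hxs : xs = [] := by
          cases xs with
          | nil => rfl
          | cons y ys => exact absurd (by simp) h
        subst hxs
        simp [aLoop, bLoop, PySem.List.pyGetD_zero]

-- ===== VERDICT (by name: the statement is the Claim_ definition above) =====
theorem calculate_minimum_cost_spec : Claim_equal_calculate_minimum_cost := by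
  intro seq _
  unfold Spec_calculate_minimum_cost calculate_minimum_cost calculate_minimum_cost_alt
  rw [main_loop seq.length seq 0 le_rfl]
  split <;> simp
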